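-- pv_equiv track=rewrite | github.com/teuodor/univeristy | ai/lab3/Main.py | normalize_communities
-- ===== SOURCE A (Python) =====
-- def normalize_communities(representation):
--     communities_dict = {}
--     communities_number = 0
--     result = []
--     for x in representation:
--         if x not in communities_dict:
--             communities_number += 1
--             communities_dict[x] = communities_number
--         result.append(communities_dict[x])
--
--     return result
-- ===== SOURCE B (Python) =====
-- def normalize_communities(representation):
--     # No relabel table: the label of x is the number of distinct values in the
--     # prefix of the list that ends at x's first occurrence.
--     return [len(set(representation[:representation.index(x) + 1]))
--             for x in representation]
-- ===== Notes on version B (the rewrite author's own statement) =====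
-- stated objective: alternative
-- what changed: Drops the assign-on-first-sight dict entirely: the label of x is computed as the number of distinct values in the prefix ending at x's first occurrence (list.index + prefix set size), correct because first-appearance rank = distinct count up to the first occurrence.
import Mathlib
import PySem

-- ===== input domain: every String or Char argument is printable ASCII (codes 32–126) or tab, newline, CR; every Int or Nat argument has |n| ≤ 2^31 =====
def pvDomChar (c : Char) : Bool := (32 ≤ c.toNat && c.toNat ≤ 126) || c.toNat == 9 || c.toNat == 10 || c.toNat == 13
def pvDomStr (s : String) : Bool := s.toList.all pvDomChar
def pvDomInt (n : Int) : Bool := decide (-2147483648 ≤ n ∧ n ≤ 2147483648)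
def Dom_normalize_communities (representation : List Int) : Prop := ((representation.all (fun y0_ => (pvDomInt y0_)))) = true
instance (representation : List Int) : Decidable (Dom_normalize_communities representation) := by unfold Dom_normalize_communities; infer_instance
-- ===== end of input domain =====

-- B drops A's assign-on-first-sight dict: each label is recomputed as the number of
-- distinct values in the prefix ending at the element's first occurrence (alternative
-- algorithm, not faster).

-- ===== PORT A =====
-- one loop iteration, step for step: the membership test possibly updates dict and
-- counter, then `result.append(communities_dict[x])` reads the post-update dict.
def pvStepA (st : PySem.Dict Int Int × Int × List Int) (x : Int) :
    PySem.Dict Int Int × Int × List Int :=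
  let st' :=
    if st.1.contains x = false then (st.1.insert x (st.2.1 + 1), st.2.1 + 1)
    else (st.1, st.2.1)
  (st'.1, st'.2, st.2.2 ++ [st'.1.getD x 0])   -- dict[x]: key always present here, so getD is exact

def normalize_communities (representation : List Int) : List Int :=
  (representation.foldl pvStepA (PySem.Dict.empty, 0, [])).2.2

-- ===== PORT B =====
def normalize_communities_alt (representation : List Int) : List Int :=
  representation.map (fun x =>
    PySem.Set.len (PySem.Set.ofList                       -- len(set(...))
      (PySem.List.slice representation none               -- representation[: index + 1]
        (some (((PySem.List.index? representation x).getD 0 : Int) + 1)))))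
        -- representation.index(x): x is drawn from the list, so index? is always some; getD 0 is exact

-- ===== PRECONDITION & SPEC =====
def Spec_normalize_communities (representation : List Int) (out : List Int) : Prop := out = normalize_communities_alt representation
instance (representation : List Int) (out : List Int) : Decidable (Spec_normalize_communities representation out) := by unfold Spec_normalize_communities; infer_instance

-- ===== CLAIM (what is proved, stated in full; the proofs are below) =====
def Claim_equal_normalize_communities : Prop := ∀ (representation : List Int), Dom_normalize_communities representation → Spec_normalize_communities representation (normalize_communities representation)

-- ===== LEMMAS AND PROOFS =====

theorem idxOf_add_of_mem {x y : Int} {L : List Int} (h : x ∈ L) :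
    (PySem.Set.add L y).idxOf x = L.idxOf x := by
  simp only [PySem.Set.add]
  split
  · rfl
  · simp [List.idxOf_append, h]

theorem mem_add_of_mem {x : Int} {L : List Int} (y : Int) (h : x ∈ L) :
    x ∈ PySem.Set.add L y := by
  simp [PySem.Set.mem_add, h]

theorem idxOf_update_of_mem {x : Int} (ys : List Int) (L : List Int) (h : x ∈ L) :
    (PySem.Set.update L ys).idxOf x = L.idxOf x := by
  induction ys generalizing L with
  | nil => rfl
  | cons y ys ih =>
      have hstep : PySem.Set.update L (y :: ys) = PySem.Set.update (PySem.Set.add L y) ys := rfl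
      rw [hstep, ih _ (mem_add_of_mem y h), idxOf_add_of_mem h]

theorem ofList_append (l t : List Int) :
    PySem.Set.ofList (l ++ t) = PySem.Set.update (PySem.Set.ofList l) t := by
  rw [PySem.Set.ofList_eq_foldl, PySem.Set.ofList_eq_foldl, List.foldl_append]
  rfl

theorem add_of_not_mem {x : Int} {L : List Int} (h : x ∉ L) :
    PySem.Set.add L x = L ++ [x] := by
  simp [PySem.Set.add, PySem.Set.contains, h]

-- B's value at every x ∈ rep equals first-appearance rank + 1 (the normal form A is
-- also reduced to): the distinct count of the prefix ending at x's first occurrence.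
theorem alt_eq (representation : List Int) :
    normalize_communities_alt representation =
      representation.map (fun x => ((PySem.Set.ofList representation).idxOf x : Int) + 1) := by
  unfold normalize_communities_alt
  apply List.map_congr_left
  intro x hx
  obtain ⟨k, hk⟩ := Option.isSome_iff_exists.mp
    ((PySem.List.index?_isSome_iff representation x).mpr hx)
  obtain ⟨pre, suf, hrep, hlen, hxpre⟩ :=
    (PySem.List.index?_eq_some_iff representation x k).mp hk
  have hxofl : x ∉ PySem.Set.ofList pre := fun h =>
    hxpre ((PySem.Set.mem_ofList pre x).mp h)
  -- the slice representation[: index+1] is exactly pre ++ [x]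
  have hslice : PySem.List.slice representation none
      (some (((PySem.List.index? representation x).getD 0 : Int) + 1)) = pre ++ [x] := by
    rw [hk]
    have h1 : (((some k).getD 0 : Nat) : Int) + 1 = ((k + 1 : Nat) : Int) := by simp
    rw [h1, PySem.List.slice_to _ (by positivity), Int.toNat_natCast, hrep, ← hlen,
      List.take_append]
    simp
  -- set(pre ++ [x]) = set(pre) ++ [x]
  have hset : PySem.Set.ofList (pre ++ [x]) = PySem.Set.ofList pre ++ [x] := by
    rw [ofList_append]
    show PySem.Set.add (PySem.Set.ofList pre) x = _
    exact add_of_not_mem hxofl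
  -- first-appearance rank of x in the whole list = |set(pre)|
  have hidx : (PySem.Set.ofList representation).idxOf x = (PySem.Set.ofList pre).length := by
    have hdecomp : representation = (pre ++ [x]) ++ suf := by
      rw [hrep]; simp
    rw [hdecomp, ofList_append, hset,
      idxOf_update_of_mem suf _ (List.mem_append_right _ (List.mem_singleton.mpr rfl)),
      List.idxOf_append]
    simp [hxofl]
  rw [hslice, hset, hidx]
  simp [PySem.Set.len]

-- A's loop invariant: the dict maps every key seen so far to its first-appearance rank + 1.
theorem loopA (rest : List Int) :
    ∀ (d : PySem.Dict Int Int) (n : Int) (res : List Int),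
      d.keys.Nodup →
      (∀ x ∈ d.keys, d.getD x 0 = (d.keys.idxOf x : Int) + 1) →
      n = (d.keys.length : Int) →
      (rest.foldl pvStepA (d, n, res)).2.2 =
      res ++ rest.map (fun x => ((PySem.Set.update d.keys rest).idxOf x : Int) + 1) := by
  induction rest with
  | nil => intro d n res _ _ _; simp
  | cons x xs ih =>
      intro d n res hnd hd hn
      rw [List.foldl_cons]
      by_cases hc : d.contains x = true
      · -- x already a key
        have hxk : x ∈ d.keys := (PySem.Dict.contains_iff_mem_keys d x).mp hc
        have hstep : pvStepA (d, n, res) x = (d, n, res ++ [d.getD x 0]) := by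
          simp [pvStepA, hc]
        have hupd : PySem.Set.update d.keys (x :: xs) = PySem.Set.update d.keys xs := by
          show PySem.Set.update (PySem.Set.add d.keys x) xs = _
          congr 1
          simp [PySem.Set.add, PySem.Set.contains, hxk]
        rw [hstep, ih d n (res ++ [d.getD x 0]) hnd hd hn, hupd, List.map_cons,
          List.append_assoc, List.singleton_append]
        congr 2
        rw [idxOf_update_of_mem xs _ hxk, hd x hxk]
      · -- new key: the counter advances and x is appended to the dict
        have hc' : d.contains x = false := by simpa using hc
        have hxk : x ∉ d.keys := fun h =>
          hc ((PySem.Dict.contains_iff_mem_keys d x).mpr h)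
        have hstep : pvStepA (d, n, res) x
            = (d.insert x (n + 1), n + 1, res ++ [(d.insert x (n + 1)).getD x 0]) := by
          simp [pvStepA, hc']
        have hkeys' : (d.insert x (n + 1)).keys = d.keys ++ [x] :=
          PySem.Dict.keys_insert_of_not_contains d (n + 1) hc'
        have hnd' : (d.insert x (n + 1)).keys.Nodup := by
          rw [hkeys']
          simp only [List.nodup_append, hnd]
          refine ⟨trivial, List.nodup_singleton x, ?_⟩
          intro a ha b hb heq
          rw [List.mem_singleton] at hb
          exact hxk ((hb ▸ heq) ▸ ha)
        have hidx_new : (d.keys ++ [x]).idxOf x = d.keys.length := by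
          rw [List.idxOf_append]; simp [hxk]
        have hd' : ∀ y ∈ (d.insert x (n + 1)).keys,
            (d.insert x (n + 1)).getD y 0 = (((d.insert x (n + 1)).keys).idxOf y : Int) + 1 := by
          intro y hy
          rw [hkeys'] at hy ⊢
          rcases List.mem_append.mp hy with hyk | hyx
          · have hyx : y ≠ x := fun h => hxk (h ▸ hyk)
            rw [PySem.Dict.getD_insert_of_ne d (n + 1) 0 hyx, hd y hyk, List.idxOf_append]
            simp [hyk]
          · have hyx : y = x := by simpa using hyx
            subst hyx
            rw [PySem.Dict.getD_insert_self, hidx_new, hn]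
        have hn' : n + 1 = (((d.insert x (n + 1)).keys).length : Int) := by
          rw [hkeys']; simp [hn]
        have hupd : PySem.Set.update d.keys (x :: xs)
            = PySem.Set.update (d.keys ++ [x]) xs := by
          show PySem.Set.update (PySem.Set.add d.keys x) xs = _
          congr 1
          simp [PySem.Set.add, PySem.Set.contains, hxk]
        rw [hstep,
          ih (d.insert x (n + 1)) (n + 1) (res ++ [(d.insert x (n + 1)).getD x 0]) hnd' hd' hn',
          hupd, hkeys', List.map_cons, List.append_assoc, List.singleton_append]
        congr 2
        rw [PySem.Dict.getD_insert_self,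
          idxOf_update_of_mem xs _ (List.mem_append_right _ (List.mem_singleton.mpr rfl)),
          hidx_new, hn]

-- ===== VERDICT (by name: the statement is the Claim_ definition above) =====
theorem normalize_communities_spec : Claim_equal_normalize_communities := by
  intro representation _
  unfold Spec_normalize_communities normalize_communities
  rw [loopA representation PySem.Dict.empty 0 []
    (by simp [PySem.Dict.keys_empty])
    (by intro x hx; simp [PySem.Dict.keys_empty] at hx)
    (by simp [PySem.Dict.keys_empty])]
  rw [alt_eq]
  have hupd : PySem.Set.update (PySem.Dict.empty : PySem.Dict Int Int).keys representation
      = PySem.Set.ofList representation := by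
    rw [PySem.Dict.keys_empty, PySem.Set.ofList_eq_foldl]; rfl
  rw [hupd]
  simp
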